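-- pv_equiv track=rewrite | github.com/Kurokamori/Monsterify-Your-Website | website/linters/css_consolidator.py | choose_canonical_name
-- ===== SOURCE A (Python) =====
-- def choose_canonical_name(class_names: list[str]) -> str:
--     """
--     Choose the best canonical name from a list of class names.
--
--     Priority:
--     1. Avoid 'admin-' prefixed names (these are scoped and shouldn't be generic)
--     2. Prefer shorter, more generic names
--     3. Prefer names without numbers
--     4. Alphabetically as tiebreaker
--     """
--     candidates = []
--
--     for name in class_names:
--         # Skip admin- prefixed names
--         if name.startswith('admin-'):
--             continue
--         candidates.append(name)
--
--     # If all names are admin-, we have to pick one (shouldn't consolidate in this case ideally)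
--     if not candidates:
--         candidates = list(class_names)
--
--     def score(name: str) -> tuple:
--         """Lower score is better."""
--         has_numbers = any(c.isdigit() for c in name)
--         # Prefer names that look more generic
--         is_utility_like = any(name.startswith(p) for p in ['flex-', 'grid-', 'text-', 'bg-', 'p-', 'm-'])
--         return (
--             has_numbers,  # Prefer no numbers
--             -is_utility_like,  # Prefer utility-like names
--             len(name),  # Prefer shorter
--             name  # Alphabetical tiebreaker
--         )
--
--     return min(candidates, key=score)
-- ===== SOURCE B (Python) =====
-- def choose_canonical_name(class_names: list[str]) -> str:
--     """Tiered elimination: instead of comparing full score tuples, narrow the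
--     field one criterion at a time (admin, digits, utility prefix, length),
--     then take the alphabetical minimum of the survivors."""
--     pool = [n for n in class_names if not n.startswith('admin-')] or list(class_names)
--     no_digits = [n for n in pool if not any(c.isdigit() for c in n)]
--     pool = no_digits or pool
--     utility = [n for n in pool if n.startswith(('flex-', 'grid-', 'text-', 'bg-', 'p-', 'm-'))]
--     pool = utility or pool
--     shortest = min(len(n) for n in pool)
--     pool = [n for n in pool if len(n) == shortest]
--     return min(pool)
-- ===== Notes on version B (the rewrite author's own statement) =====
-- stated objective: alternative
-- what changed: B replaces A's single min(candidates, key=score-tuple) with tiered elimination: it successively narrows the pool by each criterion (drop admin- names, keep digit-free names if any, keep utility-prefixed names if any, keep only the shortest) and returns the alphabetical minimum of the survivors; the results coincide because lexicographic tuple-minimisation equals refining the pool criterion by criterion. Mechanism for the measured constant-factor speedup: B never builds or compares score 4-tuples per element; …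
import Mathlib
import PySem

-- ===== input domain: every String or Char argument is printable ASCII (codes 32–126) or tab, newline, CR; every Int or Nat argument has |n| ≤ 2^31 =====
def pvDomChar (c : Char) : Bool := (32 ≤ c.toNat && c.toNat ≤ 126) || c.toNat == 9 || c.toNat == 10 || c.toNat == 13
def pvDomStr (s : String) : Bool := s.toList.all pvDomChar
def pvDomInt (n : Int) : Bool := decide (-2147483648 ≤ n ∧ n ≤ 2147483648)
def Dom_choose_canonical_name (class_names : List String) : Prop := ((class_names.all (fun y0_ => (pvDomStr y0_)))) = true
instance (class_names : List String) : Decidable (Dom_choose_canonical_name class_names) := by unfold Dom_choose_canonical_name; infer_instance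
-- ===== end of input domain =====

-- B replaces A's min-by-score-tuple with tiered elimination (filter by each
-- criterion in turn, then alphabetical minimum); objective: alternative.

-- ===== PORT A =====
-- score(name): (has_numbers, -is_utility_like, len(name), name); bool encoded as Int 0/1
def pvScoreA (name : String) : Int × Int × Int × String :=
  ((if name.toList.any (fun c => c.isDigit) then (1:Int) else 0),
   -(if ["flex-", "grid-", "text-", "bg-", "p-", "m-"].any
        (fun p => PySem.Str.startswith name p) then (1:Int) else 0),
   PySem.Str.len name, name)

-- Python's lexicographic '<' on the 4-tuple score, ported by hand (exact on these types)
def pvScoreLtA (a b : Int × Int × Int × String) : Bool :=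
  if a.1 < b.1 then true else if b.1 < a.1 then false
  else if a.2.1 < b.2.1 then true else if b.2.1 < a.2.1 then false
  else if a.2.2.1 < b.2.2.1 then true else if b.2.2.1 < a.2.2.1 then false
  else decide (a.2.2.2 < b.2.2.2)

def choose_canonical_name (class_names : List String) : String :=
  -- the candidate-collecting loop
  let candidates := class_names.foldl
    (fun acc name => if PySem.Str.startswith name "admin-" then acc else acc ++ [name]) []
  -- fallback when all names are admin-
  let candidates := if candidates = [] then class_names else candidates
  -- min(candidates, key=score): keep first element whose score no later one strictly beats
  match candidates with
  | [] => ""  -- Python raises ValueError here; excluded by Pre_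
  | c :: t => t.foldl (fun m x => if pvScoreLtA (pvScoreA x) (pvScoreA m) then x else m) c

-- ===== PORT B =====
-- '[n for n in P if c(n)] or P' — filter with fallback to the whole pool
def pvStage (c : String → Bool) (P : List String) : List String :=
  if P.filter c = [] then P else P.filter c

def pvNoDigits (n : String) : Bool := !(n.toList.any (fun c => c.isDigit))

def pvIsUtility (n : String) : Bool :=
  ["flex-", "grid-", "text-", "bg-", "p-", "m-"].any (fun p => PySem.Str.startswith n p)

-- '[n for n in P if len(n) == shortest]' then 'min(...)'
def pvPickLen (P : List String) (shortest : Int) : String :=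
  match P.filter (fun n => PySem.Str.len n == shortest) with
  | [] => ""  -- unreachable: shortest is attained in P
  | z :: zs => zs.foldl (fun m n => if n < m then n else m) z

-- 'shortest = min(len(n) for n in pool)' then the length filter and final min
def pvSelectShort (P : List String) : String :=
  match P with
  | [] => ""  -- Python raises ValueError here (empty input); excluded by Pre_
  | y :: ys =>
    pvPickLen (y :: ys)
      (ys.foldl (fun acc n => if PySem.Str.len n < acc then PySem.Str.len n else acc)
        (PySem.Str.len y))

def choose_canonical_name_alt (class_names : List String) : String :=
  pvSelectShort
    (pvStage pvIsUtility
      (pvStage pvNoDigits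
        (pvStage (fun n => !PySem.Str.startswith n "admin-") class_names)))

-- ===== PRECONDITION & SPEC =====
-- Pre_ excludes only the empty list, on which Python A raises ValueError (min of empty sequence).
def Pre_choose_canonical_name (class_names : List String) : Prop := class_names ≠ []
instance (class_names : List String) : Decidable (Pre_choose_canonical_name class_names) := by unfold Pre_choose_canonical_name; infer_instance
def pvWitness_choose_canonical_name : List String := ["admin-box", "btn-2", "btn"]

def Spec_choose_canonical_name (class_names : List String) (out : String) : Prop := out = choose_canonical_name_alt class_names
instance (class_names : List String) (out : String) : Decidable (Spec_choose_canonical_name class_names out) := by unfold Spec_choose_canonical_name; infer_instance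

-- ===== CLAIM (what is proved, stated in full; the proofs are below) =====
def Claim_equal_choose_canonical_name : Prop := ∀ (class_names : List String), Dom_choose_canonical_name class_names → Pre_choose_canonical_name class_names → Spec_choose_canonical_name class_names (choose_canonical_name class_names)

-- ===== LEMMAS AND PROOFS =====

-- the lexicographic key the proofs compare with: score as a Lex tuple
def pvToL (s : Int × Int × Int × String) : Lex (Int × Lex (Int × Lex (Int × String))) :=
  toLex (s.1, toLex (s.2.1, toLex (s.2.2.1, s.2.2.2)))

def pvKey (n : String) : Lex (Int × Lex (Int × Lex (Int × String))) := pvToL (pvScoreA n)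

-- integer projections of the first two score components
def pvDv (n : String) : Int := if pvNoDigits n then 0 else 1
def pvUv (n : String) : Int := if pvIsUtility n then -1 else 0

theorem pvKey_def (n : String) :
    pvKey n = toLex (pvDv n, toLex (pvUv n, toLex (PySem.Str.len n, n))) := by
  simp only [pvKey, pvToL, pvScoreA, pvDv, pvUv, pvNoDigits, pvIsUtility]
  by_cases h1 : (n.toList.any fun c => c.isDigit) = true <;>
    by_cases h2 : (["flex-", "grid-", "text-", "bg-", "p-", "m-"].any
      (fun p => PySem.Str.startswith n p)) = true <;>
    simp [h1] <;> split_ifs <;> norm_num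

theorem pvKey_inj {a b : String} (h : pvKey a = pvKey b) : a = b := by
  have := congrArg (fun k => (ofLex (ofLex (ofLex k).2).2).2) h
  simpa [pvKey, pvToL] using this

-- a's hand-ported tuple '<' agrees with the Lex order
theorem pvLt_bridge (s t : Int × Int × Int × String) :
    pvScoreLtA s t = true ↔ pvToL s < pvToL t := by
  obtain ⟨a1, a2, a3, a4⟩ := s
  obtain ⟨b1, b2, b3, b4⟩ := t
  simp only [pvScoreLtA, pvToL, Prod.Lex.lt_iff, ofLex_toLex]
  split_ifs <;> simp_all <;>
    first
      | omega
      | (have e1 : a1 = b1 := by omega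
         have e2 : a2 = b2 := by omega
         have e3 : a3 = b3 := by omega
         subst e1; subst e2; subst e3; simp)

theorem pvKeyLt_bridge (x m : String) :
    pvScoreLtA (pvScoreA x) (pvScoreA m) = true ↔ pvKey x < pvKey m :=
  pvLt_bridge (pvScoreA x) (pvScoreA m)

-- min-by-key fold: the result is a member and key-minimal
theorem pv_foldl_argmin {β : Type} [LinearOrder β] (f : String → β) (t : List String) (m : String) :
    (t.foldl (fun m x => if f x < f m then x else m) m) ∈ m :: t ∧
    ∀ y ∈ m :: t, f (t.foldl (fun m x => if f x < f m then x else m) m) ≤ f y := by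
  induction t generalizing m with
  | nil => exact ⟨List.mem_singleton_self m, by intro y hy; simp at hy; simp [hy]⟩
  | cons x t ih =>
    simp only [List.foldl_cons]
    by_cases h : f x < f m
    · rw [if_pos h]
      obtain ⟨hmem, hmin⟩ := ih x
      refine ⟨List.mem_cons_of_mem _ hmem, ?_⟩
      intro y hy
      rcases List.mem_cons.mp hy with rfl | hy'
      · exact le_trans (hmin x (List.mem_cons.mpr (Or.inl rfl))) (le_of_lt h)
      · exact hmin y hy'
    · rw [if_neg h]
      obtain ⟨hmem, hmin⟩ := ih m
      refine ⟨?_, ?_⟩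
      · rcases List.mem_cons.mp hmem with h' | h'
        · exact List.mem_cons.mpr (Or.inl h')
        · exact List.mem_cons_of_mem _ (List.mem_cons_of_mem _ h')
      · intro y hy
        rcases List.mem_cons.mp hy with rfl | hy'
        · exact hmin y (List.mem_cons.mpr (Or.inl rfl))
        · rcases List.mem_cons.mp hy' with rfl | hy''
          · exact le_trans (hmin m (List.mem_cons.mpr (Or.inl rfl))) (not_lt.mp h)
          · exact hmin y (List.mem_cons_of_mem _ hy'')

theorem pv_foldl_minval (f : String → Int) (t : List String) (m : Int) :
    ((t.foldl (fun acc x => if f x < acc then f x else acc) m) = m ∨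
      ∃ y ∈ t, f y = (t.foldl (fun acc x => if f x < acc then f x else acc) m)) ∧
    (t.foldl (fun acc x => if f x < acc then f x else acc) m) ≤ m ∧
    ∀ y ∈ t, (t.foldl (fun acc x => if f x < acc then f x else acc) m) ≤ f y := by
  induction t generalizing m with
  | nil => exact ⟨Or.inl rfl, le_refl m, by simp⟩
  | cons x t ih =>
    simp only [List.foldl_cons]
    by_cases h : f x < m
    · rw [if_pos h]
      obtain ⟨hat, hle, hmin⟩ := ih (f x)
      refine ⟨?_, le_trans hle (le_of_lt h), ?_⟩
      · rcases hat with h' | ⟨y, hy, hfy⟩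
        · exact Or.inr ⟨x, List.mem_cons_self, h'.symm⟩
        · exact Or.inr ⟨y, List.mem_cons_of_mem _ hy, hfy⟩
      · intro y hy
        rcases List.mem_cons.mp hy with rfl | hy
        · exact hle
        · exact hmin y hy
    · rw [if_neg h]
      obtain ⟨hat, hle, hmin⟩ := ih m
      refine ⟨?_, hle, ?_⟩
      · rcases hat with h' | ⟨y, hy, hfy⟩
        · exact Or.inl h'
        · exact Or.inr ⟨y, List.mem_cons_of_mem _ hy, hfy⟩
      · intro y hy
        rcases List.mem_cons.mp hy with rfl | hy
        · exact le_trans hle (not_lt.mp h)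
        · exact hmin y hy

-- filter-with-fallback stage: nonempty, a sub-pool, never worse on the criterion,
-- and criterion-ties of a survivor stay in the pool
theorem pv_stage (c : String → Bool) (P : List String) (hne : P ≠ []) :
    pvStage c P ≠ [] ∧ (∀ r ∈ pvStage c P, r ∈ P) ∧
    ∀ r ∈ pvStage c P, ∀ x ∈ P,
      (c x = true → c r = true) ∧ (c r = c x → x ∈ pvStage c P) := by
  unfold pvStage
  by_cases hf : P.filter c = []
  · rw [if_pos hf]
    refine ⟨hne, fun r hr => hr, fun r hr x hx => ⟨fun hcx => ?_, fun _ => hx⟩⟩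
    · exfalso
      have : x ∈ P.filter c := List.mem_filter.mpr ⟨hx, hcx⟩
      simp [hf] at this
  · rw [if_neg hf]
    refine ⟨hf, fun r hr => (List.mem_filter.mp hr).1, fun r hr x hx => ?_⟩
    have hcr : c r = true := (List.mem_filter.mp hr).2
    exact ⟨fun _ => hcr, fun hcx => List.mem_filter.mpr ⟨hx, hcx ▸ hcr⟩⟩

-- A's appending candidate loop is List.filter
theorem pvCandidates (l : List String) :
    l.foldl (fun acc name => if PySem.Str.startswith name "admin-" then acc else acc ++ [name]) []
    = l.filter (fun name => !PySem.Str.startswith name "admin-") := by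
  have hstep : (fun (acc : List String) name =>
      if PySem.Str.startswith name "admin-" then acc else acc ++ [name])
      = fun acc name => if (!PySem.Str.startswith name "admin-") then acc ++ [name] else acc := by
    funext acc name
    cases PySem.Str.startswith name "admin-" <;> rfl
  rw [hstep]
  simpa using PySem.List.foldl_append_if
    (fun name => !PySem.Str.startswith name "admin-") (fun x => x) l []

-- the admin-filtered pool both programs select from
def pvS0 (l : List String) : List String :=
  pvStage (fun n => !PySem.Str.startswith n "admin-") l

-- A's body, with the candidate loop rewritten to the shared pool pvS0
theorem pvA_eq (l : List String) :
    choose_canonical_name l = (match pvS0 l with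
      | [] => ""
      | c :: t => t.foldl (fun m x => if pvScoreLtA (pvScoreA x) (pvScoreA m) then x else m) c) := by
  unfold choose_canonical_name
  rw [pvCandidates]
  rfl

-- A computes a key-minimal member of pvS0
theorem pvA_char (l : List String) (hne : l ≠ []) :
    choose_canonical_name l ∈ pvS0 l ∧
    ∀ x ∈ pvS0 l, pvKey (choose_canonical_name l) ≤ pvKey x := by
  obtain ⟨hS0ne, -, -⟩ := pv_stage (fun n => !PySem.Str.startswith n "admin-") l hne
  rw [pvA_eq]
  cases hc : pvS0 l with
  | nil => exact absurd hc hS0ne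
  | cons c t =>
    dsimp only
    have hstep : (fun (m x : String) => if pvScoreLtA (pvScoreA x) (pvScoreA m) then x else m)
        = fun m x => if pvKey x < pvKey m then x else m := by
      funext m x
      exact if_congr (pvKeyLt_bridge x m) rfl rfl
    rw [hstep]
    exact pv_foldl_argmin pvKey t c

-- the length-filter-then-min stage, for any attained lower bound sh of the lengths
theorem pvPickLen_char (P : List String) (sh : Int)
    (hatt : ∃ w ∈ P, PySem.Str.len w = sh) :
    pvPickLen P sh ∈ P ∧ PySem.Str.len (pvPickLen P sh) = sh ∧
    ∀ x ∈ P, PySem.Str.len x = sh → pvPickLen P sh ≤ x := by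
  obtain ⟨w, hwmem, hwlen⟩ := hatt
  unfold pvPickLen
  cases hp3 : P.filter (fun n => PySem.Str.len n == sh) with
  | nil =>
    exfalso
    have hw : w ∈ P.filter (fun n => PySem.Str.len n == sh) :=
      List.mem_filter.mpr ⟨hwmem, by simp only [beq_iff_eq]; exact hwlen⟩
    rw [hp3] at hw
    exact absurd hw (List.not_mem_nil)
  | cons z zs =>
    dsimp only
    obtain ⟨hrmem, hrmin⟩ := pv_foldl_argmin (fun s => s) zs z
    have hrP3 : (zs.foldl (fun m n => if n < m then n else m) z)
        ∈ P.filter (fun n => PySem.Str.len n == sh) := hp3 ▸ hrmem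
    have hrP : (zs.foldl (fun m n => if n < m then n else m) z) ∈ P :=
      (List.mem_filter.mp hrP3).1
    have hrlen : PySem.Str.len (zs.foldl (fun m n => if n < m then n else m) z) = sh := by
      have := (List.mem_filter.mp hrP3).2
      simpa only [beq_iff_eq] using this
    refine ⟨hrP, hrlen, fun x hx hxlen => ?_⟩
    have hxP3 : x ∈ P.filter (fun n => PySem.Str.len n == sh) :=
      List.mem_filter.mpr ⟨hx, by simp only [beq_iff_eq]; exact hxlen⟩
    exact hrmin x (hp3 ▸ hxP3)

-- B's final stage: a member of P of minimal length, alphabetically least among those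
theorem pvSelectShort_char (P : List String) (hne : P ≠ []) :
    pvSelectShort P ∈ P ∧
    ∀ x ∈ P, PySem.Str.len (pvSelectShort P) ≤ PySem.Str.len x ∧
      (PySem.Str.len (pvSelectShort P) = PySem.Str.len x → pvSelectShort P ≤ x) := by
  cases P with
  | nil => exact absurd rfl hne
  | cons y ys =>
    obtain ⟨hat, hley, hmin⟩ := pv_foldl_minval PySem.Str.len ys (PySem.Str.len y)
    have hlow : ∀ x ∈ y :: ys,
        (ys.foldl (fun acc n => if PySem.Str.len n < acc then PySem.Str.len n else acc)
          (PySem.Str.len y)) ≤ PySem.Str.len x := by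
      intro x hx
      rcases List.mem_cons.mp hx with rfl | hx
      · exact hley
      · exact hmin x hx
    have hatt : ∃ w ∈ y :: ys, PySem.Str.len w =
        (ys.foldl (fun acc n => if PySem.Str.len n < acc then PySem.Str.len n else acc)
          (PySem.Str.len y)) := by
      rcases hat with h' | ⟨w, hw, hfw⟩
      · exact ⟨y, List.mem_cons_self, h'.symm⟩
      · exact ⟨w, List.mem_cons_of_mem _ hw, hfw⟩
    obtain ⟨hmem, hlen, htie⟩ := pvPickLen_char (y :: ys) _ hatt
    have hps : pvSelectShort (y :: ys) = pvPickLen (y :: ys)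
        (ys.foldl (fun acc n => if PySem.Str.len n < acc then PySem.Str.len n else acc)
          (PySem.Str.len y)) := rfl
    rw [hps]
    refine ⟨hmem, fun x hx => ⟨?_, fun hxlen => ?_⟩⟩
    · rw [hlen]
      exact hlow x hx
    · exact htie x hx (by rw [← hxlen, hlen])

-- B computes a key-minimal member of pvS0
theorem pvB_char (l : List String) (hne : l ≠ []) :
    choose_canonical_name_alt l ∈ pvS0 l ∧
    ∀ x ∈ pvS0 l, pvKey (choose_canonical_name_alt l) ≤ pvKey x := by
  obtain ⟨h0ne, h0sub, -⟩ := pv_stage (fun n => !PySem.Str.startswith n "admin-") l hne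
  obtain ⟨h1ne, h1sub, h1pr⟩ := pv_stage pvNoDigits (pvS0 l) h0ne
  obtain ⟨h2ne, h2sub, h2pr⟩ := pv_stage pvIsUtility (pvStage pvNoDigits (pvS0 l)) h1ne
  obtain ⟨hmem3, hmin3⟩ := pvSelectShort_char (pvStage pvIsUtility (pvStage pvNoDigits (pvS0 l))) h2ne
  have halt : choose_canonical_name_alt l
      = pvSelectShort (pvStage pvIsUtility (pvStage pvNoDigits (pvS0 l))) := rfl
  set r := pvSelectShort (pvStage pvIsUtility (pvStage pvNoDigits (pvS0 l))) with hrdef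
  have hr2 : r ∈ pvStage pvIsUtility (pvStage pvNoDigits (pvS0 l)) := hmem3
  have hr1 : r ∈ pvStage pvNoDigits (pvS0 l) := h2sub r hr2
  have hr0 : r ∈ pvS0 l := h1sub r hr1
  rw [halt]
  refine ⟨hr0, fun x hx => ?_⟩
  rw [pvKey_def, pvKey_def, Prod.Lex.le_iff]
  simp only [ofLex_toLex]
  -- tier 1: digits
  have hdv : pvDv r ≤ pvDv x := by
    have := (h1pr r hr1 x hx).1
    unfold pvDv
    cases hcx : pvNoDigits x
    · simp; split_ifs <;> omega
    · simp [this hcx]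
  rcases lt_or_eq_of_le hdv with hlt | heq
  · exact Or.inl hlt
  · refine Or.inr ⟨heq, ?_⟩
    have hbx : pvNoDigits r = pvNoDigits x := by
      unfold pvDv at heq
      cases h1 : pvNoDigits r <;> cases h2 : pvNoDigits x <;> simp_all
    have hx1 : x ∈ pvStage pvNoDigits (pvS0 l) := (h1pr r hr1 x hx).2 hbx
    rw [Prod.Lex.le_iff]
    simp only [ofLex_toLex]
    -- tier 2: utility prefix
    have huv : pvUv r ≤ pvUv x := by
      have := (h2pr r hr2 x hx1).1
      unfold pvUv
      cases hcx : pvIsUtility x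
      · simp; split_ifs <;> omega
      · simp [this hcx]
    rcases lt_or_eq_of_le huv with hlt | heq2
    · exact Or.inl hlt
    · refine Or.inr ⟨heq2, ?_⟩
      have hbx2 : pvIsUtility r = pvIsUtility x := by
        unfold pvUv at heq2
        cases h1 : pvIsUtility r <;> cases h2 : pvIsUtility x <;> simp_all
      have hx2 : x ∈ pvStage pvIsUtility (pvStage pvNoDigits (pvS0 l)) :=
        (h2pr r hr2 x hx1).2 hbx2
      rw [Prod.Lex.le_iff]
      simp only [ofLex_toLex]
      -- tier 3: length, then name
      obtain ⟨hlen, htie⟩ := hmin3 x hx2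
      rcases lt_or_eq_of_le hlen with hlt | heq3
      · exact Or.inl hlt
      · exact Or.inr ⟨heq3, htie heq3⟩

-- ===== VERDICT (by name: the statement is the Claim_ definition above) =====
theorem choose_canonical_name_spec : Claim_equal_choose_canonical_name := by
  intro l _ hpre
  unfold Spec_choose_canonical_name
  obtain ⟨hAmem, hAmin⟩ := pvA_char l hpre
  obtain ⟨hBmem, hBmin⟩ := pvB_char l hpre
  exact pvKey_inj (le_antisymm (hAmin _ hBmem) (hBmin _ hAmem))
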